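-- pv_equiv track=rewrite | github.com/polranirav/trading-signal | src/analytics/ml_prediction_service.py | _get_time_labels
-- ===== SOURCE A (Python) =====
-- from typing import Dict, List, Optional, Tuple
--
-- def _get_time_labels(timeframe: str, num_periods: int) -> List[str]:
--     """Generate time labels based on timeframe (includes scalping intervals)."""
--     if timeframe == "1M":
--         return [f"+{i+1}m" for i in range(num_periods)]  # +1m, +2m, +3m...
--     elif timeframe == "5M":
--         return [f"+{(i+1)*5}m" for i in range(num_periods)]  # +5m, +10m, +15m...
--     elif timeframe == "15M":
--         return [f"+{(i+1)*15}m" for i in range(num_periods)]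
--     elif timeframe == "1H":
--         return [f"Hour {i+1}" for i in range(num_periods)]
--     elif timeframe == "4H":
--         return [f"+{(i+1)*4}h" for i in range(num_periods)]
--     elif timeframe == "1D":
--         return [f"Day {i+1}" for i in range(num_periods)]
--     else:
--         return [f"Period {i+1}" for i in range(num_periods)]
-- ===== SOURCE B (Python) =====
-- _TABLE = {
--     "1M": ("+", 1, "m"),
--     "5M": ("+", 5, "m"),
--     "15M": ("+", 15, "m"),
--     "1H": ("Hour ", 1, ""),
--     "4H": ("+", 4, "h"),
--     "1D": ("Day ", 1, ""),
-- }
--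
--
-- def _get_time_labels(timeframe: str, num_periods: int):
--     pre, step, suf = _TABLE.get(timeframe, ("Period ", 1, ""))
--     acc = []
--     k = num_periods
--     # build the labels back-to-front, counting down, then reverse once
--     while k > 0:
--         acc.append(f"{pre}{k * step}{suf}")
--         k -= 1
--     return acc[::-1]
-- ===== Notes on version B (the rewrite author's own statement) =====
-- stated objective: alternative
-- what changed: Replaces the seven-branch if/elif chain of forward comprehensions with a table lookup plus a recursive back-to-front construction that prepends labels onto an accumulator, counting down from num_periods.
import Mathlib
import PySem

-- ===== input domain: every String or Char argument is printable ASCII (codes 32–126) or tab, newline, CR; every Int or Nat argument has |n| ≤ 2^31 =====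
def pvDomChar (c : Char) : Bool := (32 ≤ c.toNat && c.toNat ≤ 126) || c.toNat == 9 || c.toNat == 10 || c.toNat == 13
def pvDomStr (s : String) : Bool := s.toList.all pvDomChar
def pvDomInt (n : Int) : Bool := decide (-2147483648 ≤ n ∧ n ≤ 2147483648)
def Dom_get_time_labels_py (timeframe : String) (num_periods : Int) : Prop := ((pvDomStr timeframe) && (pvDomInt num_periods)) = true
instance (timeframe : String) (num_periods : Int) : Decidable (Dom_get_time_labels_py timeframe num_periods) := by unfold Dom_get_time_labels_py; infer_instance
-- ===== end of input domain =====

-- ===== PORT A =====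
-- B replaces the if/elif chain of forward comprehensions with a table lookup plus a descending
-- loop that appends labels back-to-front and reverses once; same values everywhere.
def get_time_labels_py (timeframe : String) (num_periods : Int) : List String :=
  if timeframe = "1M" then
    (PySem.List.pyRange 0 num_periods 1).map (fun i => "+" ++ PySem.Int.toStr (i + 1) ++ "m")
  else if timeframe = "5M" then
    (PySem.List.pyRange 0 num_periods 1).map (fun i => "+" ++ PySem.Int.toStr ((i + 1) * 5) ++ "m")
  else if timeframe = "15M" then
    (PySem.List.pyRange 0 num_periods 1).map (fun i => "+" ++ PySem.Int.toStr ((i + 1) * 15) ++ "m")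
  else if timeframe = "1H" then
    (PySem.List.pyRange 0 num_periods 1).map (fun i => "Hour " ++ PySem.Int.toStr (i + 1))
  else if timeframe = "4H" then
    (PySem.List.pyRange 0 num_periods 1).map (fun i => "+" ++ PySem.Int.toStr ((i + 1) * 4) ++ "h")
  else if timeframe = "1D" then
    (PySem.List.pyRange 0 num_periods 1).map (fun i => "Day " ++ PySem.Int.toStr (i + 1))
  else
    (PySem.List.pyRange 0 num_periods 1).map (fun i => "Period " ++ PySem.Int.toStr (i + 1))

-- ===== PORT B =====
def tlTable : PySem.Dict String (String × Int × String) :=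
  PySem.Dict.ofList
    [("1M", ("+", 1, "m")), ("5M", ("+", 5, "m")), ("15M", ("+", 15, "m")),
     ("1H", ("Hour ", 1, "")), ("4H", ("+", 4, "h")), ("1D", ("Day ", 1, ""))]

-- the while loop of Source B: fuel = k.toNat (k decreases by 1 each pass, loop exits at k ≤ 0)
def tlLoop (pre : String) (step : Int) (suf : String) : Nat → Int → List String → List String
  | 0, _, acc => acc
  | fuel + 1, k, acc =>
      tlLoop pre step suf fuel (k - 1) (acc ++ [pre ++ PySem.Int.toStr (k * step) ++ suf])

def get_time_labels_py_alt (timeframe : String) (num_periods : Int) : List String :=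
  let t := PySem.Dict.getD tlTable timeframe ("Period ", 1, "")
  (tlLoop t.1 t.2.1 t.2.2 num_periods.toNat num_periods []).reverse

-- ===== PRECONDITION & SPEC =====
def Spec_get_time_labels_py (timeframe : String) (num_periods : Int) (out : List String) : Prop := out = get_time_labels_py_alt timeframe num_periods
instance (timeframe : String) (num_periods : Int) (out : List String) : Decidable (Spec_get_time_labels_py timeframe num_periods out) := by unfold Spec_get_time_labels_py; infer_instance

-- ===== CLAIM =====
def Claim_equal_get_time_labels_py : Prop := ∀ (timeframe : String) (num_periods : Int), Dom_get_time_labels_py timeframe num_periods → Spec_get_time_labels_py timeframe num_periods (get_time_labels_py timeframe num_periods)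

-- ===== LEMMAS AND PROOFS =====
theorem tlTable_eq : tlTable = PySem.Dict.mk
    [("1M", ("+", 1, "m")), ("5M", ("+", 5, "m")), ("15M", ("+", 15, "m")),
     ("1H", ("Hour ", 1, "")), ("4H", ("+", 4, "h")), ("1D", ("Day ", 1, ""))] := by decide

-- characterisation of the descending loop started with fuel = value = n
theorem tlLoop_key (pre : String) (step : Int) (suf : String) :
    ∀ (n : Nat) (acc : List String),
      (tlLoop pre step suf n (n : Int) acc).reverse =
        ((List.range n).map (fun j => pre ++ PySem.Int.toStr (((j : Int) + 1) * step) ++ suf)) ++ acc.reverse := by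
  intro n
  induction n with
  | zero => intro acc; simp [tlLoop]
  | succ m ih =>
    intro acc
    have h1 : ((m + 1 : Nat) : Int) - 1 = (m : Int) := by push_cast; ring
    calc (tlLoop pre step suf (m + 1) ((m + 1 : Nat) : Int) acc).reverse
        = (tlLoop pre step suf m ((m : Int))
            (acc ++ [pre ++ PySem.Int.toStr (((m + 1 : Nat) : Int) * step) ++ suf])).reverse := by
          rw [tlLoop, h1]
      _ = _ := by
          rw [ih]
          simp [List.range_succ]

theorem alt_eq (timeframe : String) (num_periods : Int) :
    get_time_labels_py_alt timeframe num_periods =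
      (List.range num_periods.toNat).map (fun j =>
        (PySem.Dict.getD tlTable timeframe ("Period ", 1, "")).1 ++
        PySem.Int.toStr (((j : Int) + 1) * (PySem.Dict.getD tlTable timeframe ("Period ", 1, "")).2.1) ++
        (PySem.Dict.getD tlTable timeframe ("Period ", 1, "")).2.2) := by
  unfold get_time_labels_py_alt
  by_cases h : 0 ≤ num_periods
  · have : num_periods = (num_periods.toNat : Int) := (Int.toNat_of_nonneg h).symm
    rw [this]
    simp only [Int.toNat_natCast]
    have := tlLoop_key (PySem.Dict.getD tlTable timeframe ("Period ", 1, "")).1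
      (PySem.Dict.getD tlTable timeframe ("Period ", 1, "")).2.1
      (PySem.Dict.getD tlTable timeframe ("Period ", 1, "")).2.2 num_periods.toNat []
    simpa using this
  · have h0 : num_periods.toNat = 0 := Int.toNat_of_nonpos (le_of_not_ge h)
    rw [h0]
    simp [tlLoop]

theorem flatMap_cast (l : List Nat) :
    List.flatMap (fun a : Nat => [(a : Int)]) l = l.map (fun a : Nat => (a : Int)) := by
  induction l with
  | nil => simp
  | cons x xs ih => simp [List.flatMap_cons] at *; exact ih

-- ===== VERDICT =====
theorem get_time_labels_py_spec : Claim_equal_get_time_labels_py := by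
  intro timeframe num_periods _
  unfold Spec_get_time_labels_py
  rw [alt_eq, tlTable_eq]
  unfold get_time_labels_py
  rw [PySem.List.pyRange_one]
  simp only [sub_zero, List.map_map]
  by_cases h1 : timeframe = "1M"
  · subst h1; simp [PySem.Dict.getD, PySem.Dict.get?_mk_cons, mul_one, flatMap_cast, List.map_map]
  by_cases h2 : timeframe = "5M"
  · subst h2; simp [PySem.Dict.getD, PySem.Dict.get?_mk_cons, flatMap_cast, List.map_map, h1]
  by_cases h3 : timeframe = "15M"
  · subst h3; simp [PySem.Dict.getD, PySem.Dict.get?_mk_cons, flatMap_cast, List.map_map, h1, h2]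
  by_cases h4 : timeframe = "1H"
  · subst h4; simp [PySem.Dict.getD, PySem.Dict.get?_mk_cons, mul_one, flatMap_cast, List.map_map, h1, h2, h3]
  by_cases h5 : timeframe = "4H"
  · subst h5; simp [PySem.Dict.getD, PySem.Dict.get?_mk_cons, flatMap_cast, List.map_map, h1, h2, h3, h4]
  by_cases h6 : timeframe = "1D"
  · subst h6; simp [PySem.Dict.getD, PySem.Dict.get?_mk_cons, mul_one, flatMap_cast, List.map_map, h1, h2, h3, h4, h5]
  simp [PySem.Dict.getD, PySem.Dict.get?, mul_one, flatMap_cast, List.map_map,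
    h1, h2, h3, h4, h5, h6, Ne.symm h1, Ne.symm h2, Ne.symm h3, Ne.symm h4, Ne.symm h5, Ne.symm h6]
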